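-- pv_equiv track=rewrite | github.com/Hulyamr13/hackerrank | Sherlock and Counting.py | solve
-- ===== SOURCE A (Python) =====
-- def solve(n, k):
--     # Write your code here
--     if n == 1:
--         return 0
--
--     def ok(x):
--         return x * (n - x) <= n * k
--
--     if ok(n // 2):
--         return n - 1
--
--     if not ok(1):
--         return 0
--
--     lo, hi = 1, n // 2
--
--     while lo + 1 < hi:
--         mid = (lo + hi) // 2
--         if ok(mid):
--             lo = mid
--         else:
--             hi = mid
--
--     return lo * 2
-- ===== SOURCE B (Python) =====
-- def _isqrt(a):
--     # Newton's method integer square root (floor), a >= 0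
--     if a < 2:
--         return a
--     x = a
--     y = (x + a // x) // 2
--     while y < x:
--         x = y
--         y = (x + a // x) // 2
--     return x
--
--
-- def solve(n, k):
--     # x*(n-x) <= n*k  <=>  (n-2x)^2 >= n^2 - 4nk; count such x in [1, n-1] in closed form
--     d = n * n - 4 * n * k
--     if d <= 0:
--         return n - 1
--     c = _isqrt(d)
--     if c * c < d:
--         c += 1
--     return 2 * max(0, (n - c) // 2)
-- ===== Notes on version B (the rewrite author's own statement) =====
-- stated objective: alternative
-- what changed: Replaces A's binary search over the parabola x*(n-x) (with special cases) by a closed-form count: x qualifies iff (n-2x)^2 >= n^2-4nk, so the answer is 2*max(0,(n-c)//2) with c the least integer whose square reaches n^2-4nk, computed by a Newton integer square root.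
-- outside the precondition, e.g. on solve(-120, 0): A returns 2, B returns 0; on solve(0, 0): A returns -1, B returns -1
import Mathlib
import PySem

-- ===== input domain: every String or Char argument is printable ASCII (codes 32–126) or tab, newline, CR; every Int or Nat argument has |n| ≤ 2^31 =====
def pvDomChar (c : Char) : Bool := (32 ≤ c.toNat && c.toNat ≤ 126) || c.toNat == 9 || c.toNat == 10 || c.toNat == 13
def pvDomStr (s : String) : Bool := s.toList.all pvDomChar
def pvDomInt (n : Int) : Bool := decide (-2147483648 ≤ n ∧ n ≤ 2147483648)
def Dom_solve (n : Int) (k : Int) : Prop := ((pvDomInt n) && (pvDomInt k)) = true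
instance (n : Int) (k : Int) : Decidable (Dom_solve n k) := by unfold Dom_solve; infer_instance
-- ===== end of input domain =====

-- B replaces A's binary search over the symmetric parabola by a closed form:
-- count = 2*max(0,(n-c)//2) where c is the least integer with c*c >= n*n-4*n*k (Newton isqrt).

-- ===== PORT A =====
-- nested 'def ok(x)' of A
def solveOk (n : Int) (k : Int) (x : Int) : Bool := decide (x * (n - x) ≤ n * k)

-- the 'while lo + 1 < hi' loop of A; returns A's final 'lo * 2'
def solveLoop (n : Int) (k : Int) (lo : Int) (hi : Int) : Int :=
  if _h : lo + 1 < hi then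
    let mid := PySem.Int.floordiv (lo + hi) 2
    if solveOk n k mid then solveLoop n k mid hi else solveLoop n k lo mid
  else
    lo * 2
termination_by (hi - lo).toNat
decreasing_by
  all_goals
    have hm : PySem.Int.floordiv (lo + hi) 2 = (lo + hi) / 2 :=
      PySem.Int.floordiv_eq_ediv_of_pos (by norm_num)
    simp only [hm]
    omega

def solve (n : Int) (k : Int) : Int :=
  if n = 1 then 0
  else if solveOk n k (PySem.Int.floordiv n 2) then n - 1
  else if ¬ solveOk n k 1 then 0
  else solveLoop n k 1 (PySem.Int.floordiv n 2)

-- ===== PORT B =====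
-- the 'while y < x' loop of Source B's _isqrt; the '0 ≤ y' conjunct is a totality guard only:
-- wherever solve_alt calls it, y is provably positive, so the guard never fires differently from Python
def isqrtGo (a : Int) (x : Int) : Int :=
  let y := PySem.Int.floordiv (x + PySem.Int.floordiv a x) 2
  if 0 ≤ y ∧ y < x then isqrtGo a y else x
termination_by x.toNat
decreasing_by omega

-- Source B's _isqrt (Newton's method, floor square root)
def isqrtNewton (a : Int) : Int :=
  if a < 2 then a else isqrtGo a a

def solve_alt (n : Int) (k : Int) : Int :=
  let d := n * n - 4 * n * k
  if d ≤ 0 then n - 1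
  else
    let c0 := isqrtNewton d
    let c := if c0 * c0 < d then c0 + 1 else c0
    2 * max 0 (PySem.Int.floordiv (n - c) 2)

-- ===== PRECONDITION & SPEC =====
-- Pre_ restricts to the problem's natural domain n ≥ 1 (HackerRank guarantees it); on
-- nonpositive n the candidate range is empty and A's returned values (e.g. a negative
-- "count" n-1, or 2 from leftover loop state) are accidents no caller would specify;
-- B coincidentally returns the same accidental value on part of that region.
def Pre_solve (n : Int) (k : Int) : Prop := 1 ≤ n
instance (n : Int) (k : Int) : Decidable (Pre_solve n k) := by unfold Pre_solve; infer_instance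
def pvWitness_solve : Int × Int := (7, 2)

def Spec_solve (n : Int) (k : Int) (out : Int) : Prop := out = solve_alt n k
instance (n : Int) (k : Int) (out : Int) : Decidable (Spec_solve n k out) := by unfold Spec_solve; infer_instance

-- ===== CLAIM (what is proved, stated in full; the proofs are below) =====
def Claim_equal_solve : Prop := ∀ (n : Int) (k : Int), Dom_solve n k → Pre_solve n k → Spec_solve n k (solve n k)

-- ===== LEMMAS AND PROOFS =====

-- the reference value both programs compute: the number of x in [1, n-1] with x*(n-x) ≤ n*k
def countF (n : Int) (k : Int) : Int :=
  ((PySem.List.pyRange 1 n 1).countP (fun x => decide (x * (n - x) ≤ n * k)) : Int)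

-- monotone side of the parabola: x ≤ y and x + y ≤ n give x*(n-x) ≤ y*(n-y)
theorem parabola_mono {n x y : Int} (hxy : x ≤ y) (hsum : x + y ≤ n) :
    x * (n - x) ≤ y * (n - y) := by nlinarith

theorem countF_all {n k : Int} (hn : 1 ≤ n)
    (h : ∀ x : Int, 1 ≤ x → x < n → x * (n - x) ≤ n * k) :
    countF n k = n - 1 := by
  unfold countF
  rw [List.countP_eq_length.mpr, PySem.List.length_pyRange_one]
  · omega
  · intro a ha
    rw [PySem.List.mem_pyRange_one] at ha
    simpa using h a ha.1 ha.2

theorem countF_none {n k : Int}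
    (h : ∀ x : Int, 1 ≤ x → x < n → ¬ x * (n - x) ≤ n * k) :
    countF n k = 0 := by
  unfold countF
  rw [List.countP_eq_zero.mpr]
  · rfl
  · intro a ha
    rw [PySem.List.mem_pyRange_one] at ha
    simpa using h a ha.1 ha.2

-- two satisfied blocks [1, lo] and [n-lo, n-1] around an unsatisfied middle: count = lo * 2
theorem countF_two_blocks {n k lo : Int} (h1 : 1 ≤ lo) (h2 : 2 * lo + 2 ≤ n)
    (hlow : ∀ x : Int, 1 ≤ x → x ≤ lo → x * (n - x) ≤ n * k)
    (hmid : ∀ x : Int, lo < x → x < n - lo → ¬ x * (n - x) ≤ n * k)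
    (hhigh : ∀ x : Int, n - lo ≤ x → x < n → x * (n - x) ≤ n * k) :
    countF n k = lo * 2 := by
  unfold countF
  rw [PySem.List.pyRange_one_append 1 (lo + 1) n (by omega) (by omega),
      PySem.List.pyRange_one_append (lo + 1) (n - lo) n (by omega) (by omega),
      List.countP_append, List.countP_append]
  have e1 : ((PySem.List.pyRange 1 (lo + 1) 1).countP
      (fun x => decide (x * (n - x) ≤ n * k)) : Int) = lo := by
    rw [List.countP_eq_length.mpr, PySem.List.length_pyRange_one]
    · omega
    · intro a ha
      rw [PySem.List.mem_pyRange_one] at ha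
      simpa using hlow a ha.1 (by omega)
  have e2 : ((PySem.List.pyRange (lo + 1) (n - lo) 1).countP
      (fun x => decide (x * (n - x) ≤ n * k)) : Int) = 0 := by
    rw [List.countP_eq_zero.mpr]
    · rfl
    · intro a ha
      rw [PySem.List.mem_pyRange_one] at ha
      simpa using hmid a (by omega) ha.2
  have e3 : ((PySem.List.pyRange (n - lo) n 1).countP
      (fun x => decide (x * (n - x) ≤ n * k)) : Int) = lo := by
    rw [List.countP_eq_length.mpr, PySem.List.length_pyRange_one]
    · omega
    · intro a ha
      rw [PySem.List.mem_pyRange_one] at ha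
      simpa using hhigh a ha.1 ha.2
  push_cast
  push_cast at e1 e2 e3
  omega

-- ===== A's side: the binary search computes countF =====

theorem loop_count (n k : Int) (hn : 2 ≤ n) (lo hi : Int)
    (h1 : 1 ≤ lo) (h2 : lo < hi) (h3 : hi ≤ n / 2)
    (hp : lo * (n - lo) ≤ n * k) (hq : ¬ hi * (n - hi) ≤ n * k) :
    solveLoop n k lo hi = countF n k := by
  rw [solveLoop]
  by_cases hc : lo + 1 < hi
  · have hm : PySem.Int.floordiv (lo + hi) 2 = (lo + hi) / 2 :=
      PySem.Int.floordiv_eq_ediv_of_pos (by norm_num)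
    have hmid1 : lo < (lo + hi) / 2 := by omega
    have hmid2 : (lo + hi) / 2 < hi := by omega
    simp only [hc, hm, solveOk]
    by_cases hok : (lo + hi) / 2 * (n - (lo + hi) / 2) ≤ n * k
    · rw [if_pos (by simpa using hok)]
      exact loop_count n k hn _ hi (by omega) hmid2 h3 hok hq
    · rw [if_neg (by simpa using hok)]
      exact loop_count n k hn lo _ h1 hmid1 (by omega) hp hok
  · -- loop exit: hi = lo + 1, so lo is the last satisfied point below n/2
    have hhi : hi = lo + 1 := by omega
    rw [dif_neg hc]
    refine (countF_two_blocks h1 (by omega) ?_ ?_ ?_).symm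
    · intro x hx1 hx2
      exact le_trans (parabola_mono hx2 (by omega)) hp
    · intro x hx1 hx2 hcon
      exact hq (le_trans (by rw [hhi]; exact parabola_mono (by omega) (by omega)) hcon)
    · intro x hx1 hx2
      have hsym : x * (n - x) = (n - x) * (n - (n - x)) := by ring
      rw [hsym]
      exact le_trans (parabola_mono (by omega) (by omega)) hp
termination_by (hi - lo).toNat
decreasing_by all_goals omega

theorem solve_eq_countF (n k : Int) (hpre : 1 ≤ n) : solve n k = countF n k := by
  unfold solve
  by_cases h1 : n = 1
  · subst h1
    rw [if_pos rfl]
    unfold countF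
    simp [PySem.List.pyRange_one_eq_nil (by norm_num : (1:Int) ≤ 1)]
  · have hn2 : 2 ≤ n := by omega
    have hfd : PySem.Int.floordiv n 2 = n / 2 :=
      PySem.Int.floordiv_eq_ediv_of_pos (by norm_num)
    rw [if_neg h1]
    simp only [solveOk, hfd]
    by_cases hhalf : n / 2 * (n - n / 2) ≤ n * k
    · rw [if_pos (by simpa using hhalf)]
      refine (countF_all (by omega) ?_).symm
      intro x hx1 hx2
      by_cases hle : x ≤ n / 2
      · exact le_trans (parabola_mono hle (by omega)) hhalf
      · have hsym : x * (n - x) = (n - x) * (n - (n - x)) := by ring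
        rw [hsym]
        exact le_trans (parabola_mono (by omega) (by omega)) hhalf
    · rw [if_neg (by simpa using hhalf)]
      by_cases hone : (1 : Int) * (n - 1) ≤ n * k
      · rw [if_neg (by simpa using hone)]
        have hlt : 1 < n / 2 := by
          by_contra hle
          exact hhalf (by
            have : n / 2 = 1 := by omega
            rw [this]; simpa using hone)
        exact loop_count n k hn2 1 (n / 2) le_rfl hlt le_rfl hone hhalf
      · rw [if_pos (by simpa using hone)]
        refine (countF_none ?_).symm
        intro x hx1 hx2 hcon
        exact hone (le_trans (parabola_mono hx1 (by omega)) hcon)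

-- ===== B's side: isqrt correctness and the closed form =====

-- one Newton step from a positive x never goes below the floor square root
theorem newton_step_ge {a x s : Int} (hx : 1 ≤ x) (hs : 0 ≤ s) (hs2 : s * s ≤ a) :
    s ≤ (x + a / x) / 2 := by
  have hx0 : 0 < x := by omega
  have hmod1 : 0 ≤ a % x := Int.emod_nonneg a (by omega)
  have hmod2 : a % x < x := Int.emod_lt_of_pos a hx0
  have hdiv : x * (a / x) + a % x = a := Int.ediv_add_emod a x
  have hq : 0 ≤ a / x := by nlinarith
  by_contra hlt
  push_neg at hlt
  have hub : x + a / x + 1 ≤ 2 * s := by omega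
  have hnn : 0 ≤ x + a / x + 1 := by omega
  have hsq : (x + a / x + 1) * (x + a / x + 1) ≤ (2 * s) * (2 * s) :=
    mul_self_le_mul_self hnn hub
  nlinarith [sq_nonneg (x - a / x - 1)]

theorem isqrtGo_eq (a x s : Int) (ha : 2 ≤ a) (hs1 : 1 ≤ s)
    (hs2 : s * s ≤ a) (hs3 : a < (s + 1) * (s + 1)) (hx : s ≤ x) :
    isqrtGo a x = s := by
  rw [isqrtGo]
  have hx1 : 1 ≤ x := by omega
  have hfx : PySem.Int.floordiv a x = a / x := PySem.Int.floordiv_eq_ediv_of_pos (by omega)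
  have hf2 : PySem.Int.floordiv (x + PySem.Int.floordiv a x) 2 = (x + a / x) / 2 := by
    rw [hfx]; exact PySem.Int.floordiv_eq_ediv_of_pos (by norm_num)
  have hy : s ≤ (x + a / x) / 2 := newton_step_ge hx1 (by omega) hs2
  simp only [hf2]
  by_cases hc : 0 ≤ (x + a / x) / 2 ∧ (x + a / x) / 2 < x
  · rw [if_pos hc]
    exact isqrtGo_eq a _ s ha hs1 hs2 hs3 hy
  · rw [if_neg hc]
    -- loop exit: x ≤ (x + a//x)/2 forces a//x ≥ x, hence x*x ≤ a, hence x ≤ s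
    have hexit : x ≤ (x + a / x) / 2 := by
      rcases not_and_or.mp hc with h | h
      · omega
      · omega
    have hqx : x ≤ a / x := by omega
    have hx0 : 0 < x := by omega
    have hmod1 : 0 ≤ a % x := Int.emod_nonneg a (by omega)
    have hdiv : x * (a / x) + a % x = a := Int.ediv_add_emod a x
    have hxx : x * x ≤ a := by nlinarith
    have hxs : x ≤ s := by nlinarith
    omega
termination_by x.toNat
decreasing_by omega

theorem isqrtNewton_eq (a s : Int) (ha : 2 ≤ a) (hs1 : 1 ≤ s)
    (hs2 : s * s ≤ a) (hs3 : a < (s + 1) * (s + 1)) :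
    isqrtNewton a = s := by
  unfold isqrtNewton
  rw [if_neg (by omega)]
  exact isqrtGo_eq a a s ha hs1 hs2 hs3 (by nlinarith)

-- membership in the counted set, as a square inequality
theorem sat_iff (n k x : Int) : x * (n - x) ≤ n * k ↔ n * n - 4 * n * k ≤ (n - 2 * x) * (n - 2 * x) := by
  constructor <;> intro h <;> nlinarith

theorem solve_alt_eq_countF (n k : Int) (hpre : 1 ≤ n) : solve_alt n k = countF n k := by
  simp only [solve_alt]
  set d := n * n - 4 * n * k with hdef
  by_cases hd : d ≤ 0
  · rw [if_pos hd]
    refine (countF_all hpre ?_).symm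
    intro x hx1 hx2
    rw [sat_iff]
    nlinarith [sq_nonneg (n - 2 * x)]
  · rw [if_neg hd]
    have hd1 : 1 ≤ d := by omega
    clear_value d
    obtain ⟨s, hs0, hs2, hs3⟩ : ∃ s : Int, 0 ≤ s ∧ s * s ≤ d ∧ d < (s + 1) * (s + 1) := by
      refine ⟨(Nat.sqrt d.toNat : Int), by positivity, ?_, ?_⟩
      · have h1 := Nat.sqrt_le' d.toNat
        zify at h1
        rw [Int.toNat_of_nonneg (by omega)] at h1
        nlinarith [h1]
      · have h1 := Nat.lt_succ_sqrt' d.toNat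
        zify at h1
        rw [Int.toNat_of_nonneg (by omega)] at h1
        nlinarith [h1]
    have hc0 : isqrtNewton d = s := by
      by_cases ha2 : 2 ≤ d
      · have hs1' : 1 ≤ s := by nlinarith
        exact isqrtNewton_eq d s ha2 hs1' hs2 hs3
      · have hd1' : d = 1 := by omega
        have hsle : s ≤ 1 := by nlinarith
        have hsge : 1 ≤ s := by nlinarith [sq_nonneg s]
        unfold isqrtNewton
        rw [if_pos (by omega)]
        omega
    rw [hc0]
    have hif1 : d ≤ (if s * s < d then s + 1 else s) * (if s * s < d then s + 1 else s) := by
      split_ifs with h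
      · nlinarith
      · omega
    have hif2 : ((if s * s < d then s + 1 else s) - 1) * ((if s * s < d then s + 1 else s) - 1) < d := by
      split_ifs with h
      · simpa using h
      · nlinarith
    have hif3 : 1 ≤ (if s * s < d then s + 1 else s) := by
      split_ifs with h
      · omega
      · nlinarith
    generalize hgc : (if s * s < d then s + 1 else s) = c
    rw [hgc] at hif1 hif2 hif3
    have hc1 : d ≤ c * c := hif1
    have hc2 : (c - 1) * (c - 1) < d := hif2
    have hcpos : 1 ≤ c := hif3
    have hfl : PySem.Int.floordiv (n - c) 2 = (n - c) / 2 :=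
      PySem.Int.floordiv_eq_ediv_of_pos (by norm_num)
    rw [hfl]
    set lo := (n - c) / 2 with hlo
    have hlo1 : 2 * lo ≤ n - c := by omega
    have hlo2 : n - c - 1 ≤ 2 * lo := by omega
    clear_value lo
    by_cases hlop : 1 ≤ lo
    · -- two blocks of lo satisfied values each
      have hc2' : 2 ≤ c := by
        by_contra hcc
        have hceq : c = 1 := by omega
        have hdd1 : d = 1 := by
          rw [hceq] at hc1
          omega
        have hn1 : n * (n - 4 * k) = 1 := by linear_combination hdd1 - hdef
        have hneq1 : n = 1 := by
          by_contra h2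
          have hn2 : 2 ≤ n := by omega
          by_cases h3 : n - 4 * k ≤ 0
          · nlinarith
          · nlinarith
        omega
      have hA : ∀ x : Int, 1 ≤ x → x ≤ lo → x * (n - x) ≤ n * k := by
        intro x hx1 hx2
        rw [sat_iff]
        have h1 : c ≤ n - 2 * x := by omega
        have h2 : c * c ≤ (n - 2 * x) * (n - 2 * x) := mul_self_le_mul_self (by omega) h1
        omega
      have hB : ∀ x : Int, lo < x → x < n - lo → ¬ x * (n - x) ≤ n * k := by
        intro x hx1 hx2 hcon
        rw [sat_iff] at hcon
        have h1 : |n - 2 * x| ≤ c - 1 := abs_le.mpr ⟨by omega, by omega⟩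
        have h2 : (n - 2 * x) * (n - 2 * x) ≤ (c - 1) * (c - 1) := by
          rw [← abs_mul_abs_self (n - 2 * x)]
          exact mul_self_le_mul_self (abs_nonneg _) h1
        omega
      have hC : ∀ x : Int, n - lo ≤ x → x < n → x * (n - x) ≤ n * k := by
        intro x hx1 hx2
        rw [sat_iff]
        have h1 : c ≤ 2 * x - n := by omega
        have h2 : c * c ≤ (2 * x - n) * (2 * x - n) := mul_self_le_mul_self (by omega) h1
        have h3 : (n - 2 * x) * (n - 2 * x) = (2 * x - n) * (2 * x - n) := by ring
        omega
      rw [max_eq_right (by omega : (0:Int) ≤ lo),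
          countF_two_blocks hlop (by omega) hA hB hC]
      ring
    · -- no x qualifies
      have hnone : ∀ x : Int, 1 ≤ x → x < n → ¬ x * (n - x) ≤ n * k := by
        intro x hx1 hx2 hcon
        rw [sat_iff] at hcon
        by_cases hside : 2 * x ≤ n
        · have h1 : c ≤ n - 2 * x := by
            by_contra hh
            have h4 : (n - 2 * x) * (n - 2 * x) ≤ (c - 1) * (c - 1) :=
              mul_self_le_mul_self (by omega) (by omega)
            omega
          omega
        · have h3 : (n - 2 * x) * (n - 2 * x) = (2 * x - n) * (2 * x - n) := by ring
          have h1 : c ≤ 2 * x - n := by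
            by_contra hh
            have h4 : (2 * x - n) * (2 * x - n) ≤ (c - 1) * (c - 1) :=
              mul_self_le_mul_self (by omega) (by omega)
            omega
          omega
      rw [max_eq_left (by omega : lo ≤ 0), countF_none hnone]
      ring

-- ===== VERDICT (by name: the statement is the Claim_ definition above) =====
theorem solve_spec : Claim_equal_solve := by
  intro n k _hd hpre
  unfold Spec_solve
  rw [solve_eq_countF n k hpre, solve_alt_eq_countF n k hpre]
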